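-- pv_equiv track=rewrite | github.com/TL-System/plato | examples/personalized_fl/pflbases/fedavg_partial.py | extract_modules_name
-- ===== SOURCE A (Python) =====
-- import string
--
-- def extract_modules_name(parameter_names):
--     """Extract module names from given parameter names."""
--
--     extracted_names = []
--     # Remove punctuation and split the strings into words and sub-words
--     translator = str.maketrans("", "", string.punctuation)
--     combined_subnames = [
--         [subname.translate(translator).lower() for subname in word.split(".")]
--         for word in parameter_names
--     ]
--
--     # An indicator of the level where the strings begin to differ
--     diff_level = 0
--     # Find the point where the strings begin to differ in content
--     for level, subnames in enumerate(zip(*combined_subnames)):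
--         if len(set(subnames)) > 1:
--             diff_level = level
--             break
--     # Increase the level by 1
--     diff_level += 1
--     # the para name is presented as encoder.xxx.xxx
--     # that is combined by the key_word "."
--     # we aim to extract the encoder
--     split_str = "."
--     for para_name in parameter_names:
--         splitted_names = para_name.split(split_str)
--         core_names = splitted_names[:diff_level]
--         module_name = f"{split_str}".join(core_names)
--         if module_name not in extracted_names:
--             extracted_names.append(module_name)
--
--     return extracted_names
-- ===== SOURCE B (Python) =====
-- import string
--
-- def extract_modules_name(parameter_names):
--     """Extract module names from given parameter names."""
--     if not parameter_names:
--         return []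
--     translator = str.maketrans("", "", string.punctuation)
--     combined = [
--         [sub.translate(translator).lower() for sub in name.split(".")]
--         for name in parameter_names
--     ]
--     # os.path.commonprefix trick: the lexicographic min and max bound every
--     # list, so the first index where they differ is the first column where
--     # the normalized names disagree.
--     lo, hi = min(combined), max(combined)
--     diff_level = 0
--     for i, (a, b) in enumerate(zip(lo, hi)):
--         if a != b:
--             diff_level = i
--             break
--     diff_level += 1
--     seen = dict.fromkeys(
--         ".".join(name.split(".")[:diff_level]) for name in parameter_names
--     )
--     return list(seen)
-- ===== Notes on version B (the rewrite author's own statement) =====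
-- stated objective: faster
-- what changed: diff_level is found by comparing only the lexicographic min and max of the normalized token lists (the os.path.commonprefix trick) instead of transposing all lists with zip(*...) and building a set per column, and the final order-preserving dedup uses dict.fromkeys instead of a linear 'not in' scan over the accumulator list.
import Mathlib
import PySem

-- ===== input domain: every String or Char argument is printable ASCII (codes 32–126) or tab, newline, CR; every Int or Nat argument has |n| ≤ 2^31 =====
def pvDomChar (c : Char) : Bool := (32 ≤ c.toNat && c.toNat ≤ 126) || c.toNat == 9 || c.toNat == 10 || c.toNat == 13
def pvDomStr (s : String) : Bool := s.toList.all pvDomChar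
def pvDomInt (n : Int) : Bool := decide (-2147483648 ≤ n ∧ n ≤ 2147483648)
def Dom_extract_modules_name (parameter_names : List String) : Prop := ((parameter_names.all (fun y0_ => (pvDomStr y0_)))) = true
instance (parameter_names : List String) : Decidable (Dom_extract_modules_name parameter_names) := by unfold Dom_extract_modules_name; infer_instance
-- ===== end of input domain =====

-- B finds diff_level by comparing only the lexicographic min and max of the normalized
-- token lists (the os.path.commonprefix trick) instead of transposing with zip(*...)
-- and building a set per column, and dedups via dict.fromkeys instead of a linear 'not in' scan (objective: faster, measured).

-- ===== PORT A =====
-- string.punctuation; subname.translate(str.maketrans("", "", string.punctuation)) deletes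
-- exactly these chars (exact: inputs are ASCII and translate just filters them out here)
def pvPunct : List Char := "!\"#$%&'()*+,-./:;<=>?@[\\]^_`{|}~".toList

-- [subname.translate(translator).lower() for subname in word.split(".")]  (shared by both Pythons verbatim)
def pvNorm (word : String) : List String :=
  ((PySem.Str.split? word ".").getD []).map
    (fun subname => PySem.Str.lower (String.ofList (subname.toList.filter (fun c => decide (c ∉ pvPunct)))))

-- ".".join(name.split(".")[:diff_level])  (appears verbatim in both Pythons)
def pvModuleName (diff_level : Int) (name : String) : String :=
  PySem.Str.join "." (PySem.List.slice ((PySem.Str.split? name ".").getD []) none (some diff_level))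

-- zip(*combined): list of columns, truncated at the shortest row (empty for zip())
def pvZipStar (ls : List (List String)) : List (List String) :=
  match ls with
  | [] => []
  | l :: rest =>
    (List.range (rest.foldl (fun m x => min m x.length) l.length)).map
      (fun i => (l :: rest).map (fun x => x.getD i ""))

-- for level, subnames in enumerate(...): if len(set(subnames)) > 1: diff_level = level; break
def pvFindDiff : List (Int × List String) → Int
  | [] => 0
  | (level, subnames) :: rest =>
    if 1 < PySem.Set.len (PySem.Set.ofList subnames) then level else pvFindDiff rest

def extract_modules_name (parameter_names : List String) : List String :=
  let combined_subnames := parameter_names.map pvNorm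
  let diff_level := pvFindDiff (PySem.List.enumerate (pvZipStar combined_subnames)) + 1
  parameter_names.foldl
    (fun extracted_names para_name =>
      let module_name := pvModuleName diff_level para_name
      if module_name ∈ extracted_names then extracted_names else extracted_names ++ [module_name])
    []

-- ===== PORT B =====
-- min(combined) / max(combined): Python list comparison is the lexicographic linear order
def pvLexMin (cs : List (List String)) : Option (List String) :=
  @PySem.List.min? (List String) (List String) Preorder.toLT LinearOrder.toDecidableLT cs (fun x => x)
def pvLexMax (cs : List (List String)) : Option (List String) :=
  @PySem.List.max? (List String) (List String) Preorder.toLT LinearOrder.toDecidableLT cs (fun x => x)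

-- for i, (a, b) in enumerate(zip(lo, hi)): if a != b: diff_level = i; break
def pvFirstNe : List (Int × (String × String)) → Int
  | [] => 0
  | (i, (a, b)) :: rest => if a ≠ b then i else pvFirstNe rest

def extract_modules_name_alt (parameter_names : List String) : List String :=
  if parameter_names.isEmpty then [] else
  let combined := parameter_names.map pvNorm
  let lo := (pvLexMin combined).getD []
  let hi := (pvLexMax combined).getD []
  let diff_level := pvFirstNe (PySem.List.enumerate (lo.zip hi)) + 1
  PySem.List.dedup (parameter_names.map (pvModuleName diff_level))

-- ===== PRECONDITION & SPEC =====
def Spec_extract_modules_name (parameter_names : List String) (out : List String) : Prop := out = extract_modules_name_alt parameter_names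
instance (parameter_names : List String) (out : List String) : Decidable (Spec_extract_modules_name parameter_names out) := by unfold Spec_extract_modules_name; infer_instance

-- ===== CLAIM (what is proved, stated in full; the proofs are below) =====
def Claim_equal_extract_modules_name : Prop := ∀ (parameter_names : List String), Dom_extract_modules_name parameter_names → Spec_extract_modules_name parameter_names (extract_modules_name parameter_names)

-- ===== LEMMAS AND PROOFS =====

lemma pv_foldl_dedup (names : List String) (f : String → String) (acc : List String) :
    names.foldl (fun extracted name =>
      if f name ∈ extracted then extracted else extracted ++ [f name]) acc
      = PySem.Set.update acc (names.map f) := by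
  induction names generalizing acc with
  | nil => simp [PySem.Set.update]
  | cons n rest ih =>
    simp only [List.foldl_cons, List.map_cons, PySem.Set.update, List.foldl_cons] at *
    rw [ih]
    congr 1
    simp [PySem.Set.add, PySem.Set.contains, List.contains_iff_mem]

lemma pv_cons_le_cons_iff (a b : String) (l1 l2 : List String) :
    (a :: l1) ≤ (b :: l2) ↔ a < b ∨ (a = b ∧ l1 ≤ l2) := by
  have hlt : ∀ (x y : List String), x < y ↔ List.Lex (·<·) x y := fun _ _ => Iff.rfl
  rw [le_iff_lt_or_eq, le_iff_lt_or_eq, hlt, hlt, List.cons_lex_cons_iff, List.cons.injEq]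
  tauto

lemma pv_nil_lt_cons (a : String) (l : List String) : ([] : List String) < a :: l :=
  List.Lex.nil

lemma pv_take_lt (l : List String) (j : Nat) (h : j < l.length) : l.take j < l := by
  induction l generalizing j with
  | nil => simp at h
  | cons x t ih =>
    cases j with
    | zero => exact pv_nil_lt_cons x t
    | succ j =>
      simp only [List.take_succ_cons]
      exact List.Lex.cons (ih j (by simpa using h))

lemma pv_sandwich (k : Nat) (lo x hi : List String) (h1 : lo ≤ x) (h2 : x ≤ hi)
    (hk : k ≤ lo.length) (hpre : lo.take k = hi.take k) :
    x.take k = lo.take k ∧ k ≤ x.length := by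
  induction k generalizing lo x hi with
  | zero => simp
  | succ k ih =>
    match lo, hi, x with
    | [], _, _ => simp at hk
    | a :: lo', [], _ => simp [List.take_succ_cons] at hpre
    | a :: lo', b :: hi', [] =>
      exact absurd (lt_of_le_of_lt h1 (pv_nil_lt_cons a lo')) (lt_irrefl _)
    | a :: lo', b :: hi', c :: x' =>
      simp only [List.take_succ_cons, List.cons.injEq] at hpre
      obtain ⟨hab, htail⟩ := hpre
      subst hab
      rcases (pv_cons_le_cons_iff _ _ _ _).mp h1 with h1' | ⟨rfl, h1'⟩ <;>
        rcases (pv_cons_le_cons_iff _ _ _ _).mp h2 with h2' | ⟨he2, h2'⟩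
      · exact absurd (h1'.trans h2') (lt_irrefl _)
      · subst he2; exact absurd h1' (lt_irrefl _)
      · exact absurd h2' (lt_irrefl _)
      · obtain ⟨ht, hl⟩ := ih lo' x' hi' h1' h2' (by simpa using hk) htail
        refine ⟨by simp [List.take_succ_cons, ht], by simpa using hl⟩

lemma pv_setlen_le_one_iff (col : List String) :
    ¬ (1 < PySem.Set.len (PySem.Set.ofList col)) ↔ ∀ a ∈ col, ∀ b ∈ col, a = b := by
  simp only [PySem.Set.len, not_lt]
  constructor
  · intro h a ha b hb
    have ha' := (PySem.Set.mem_ofList col a).mpr ha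
    have hb' := (PySem.Set.mem_ofList col b).mpr hb
    rcases e : PySem.Set.ofList col with _ | ⟨x, _ | ⟨y, t⟩⟩
    · rw [e] at ha'; simp at ha'
    · rw [e] at ha' hb'; simp at ha' hb'; rw [ha', hb']
    · rw [e] at h; simp at h; omega
  · intro h
    by_contra hlt
    rw [not_le] at hlt
    rcases e : PySem.Set.ofList col with _ | ⟨x, _ | ⟨y, t⟩⟩
    · rw [e] at hlt; simp at hlt
    · rw [e] at hlt; simp at hlt
    · have hnd := PySem.Set.nodup_ofList col
      rw [e] at hnd
      have hx : x ∈ col := (PySem.Set.mem_ofList col x).mp (by rw [e]; simp)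
      have hy : y ∈ col := (PySem.Set.mem_ofList col y).mp (by rw [e]; simp)
      have := h x hx y hy
      simp [this] at hnd


lemma pv_findDiff_zero (cols : List (List String)) (s : Int)
    (h : ∀ col ∈ cols, ¬ (1 < PySem.Set.len (PySem.Set.ofList col))) :
    pvFindDiff (PySem.List.enumerate cols s) = 0 := by
  induction cols generalizing s with
  | nil => simp [PySem.List.enumerate, pvFindDiff]
  | cons c rest ih =>
    rw [PySem.List.enumerate_cons]
    simp only [pvFindDiff]
    rw [if_neg (h c (by simp))]
    exact ih (s + 1) (fun col hc => h col (by simp [hc]))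

lemma pv_findDiff_first (cols : List (List String)) (s : Int) (j : Nat) (hj : j < cols.length)
    (hb : ∀ i (h : i < j), ¬ (1 < PySem.Set.len (PySem.Set.ofList cols[i])))
    (ht : 1 < PySem.Set.len (PySem.Set.ofList cols[j])) :
    pvFindDiff (PySem.List.enumerate cols s) = s + j := by
  induction cols generalizing s j with
  | nil => simp at hj
  | cons c rest ih =>
    rw [PySem.List.enumerate_cons]
    simp only [pvFindDiff]
    cases j with
    | zero => rw [if_pos (by simpa using ht)]; simp
    | succ j =>
      rw [if_neg (by simpa using hb 0 (by omega))]
      rw [ih (s + 1) j (by simpa using hj) (fun i hi => by simpa using hb (i + 1) (by omega))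
        (by simpa using ht)]
      push_cast; ring

lemma pv_firstNe_zero (ps : List (String × String)) (s : Int)
    (h : ∀ p ∈ ps, p.1 = p.2) :
    pvFirstNe (PySem.List.enumerate ps s) = 0 := by
  induction ps generalizing s with
  | nil => simp [PySem.List.enumerate, pvFirstNe]
  | cons p rest ih =>
    rw [PySem.List.enumerate_cons]
    obtain ⟨a, b⟩ := p
    simp only [pvFirstNe]
    rw [if_neg (by simpa using h (a, b) (by simp))]
    exact ih (s + 1) (fun q hq => h q (by simp [hq]))

lemma pv_firstNe_first (ps : List (String × String)) (s : Int) (j : Nat) (hj : j < ps.length)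
    (hb : ∀ i (h : i < j), ps[i].1 = ps[i].2)
    (ht : ps[j].1 ≠ ps[j].2) :
    pvFirstNe (PySem.List.enumerate ps s) = s + j := by
  induction ps generalizing s j with
  | nil => simp at hj
  | cons p rest ih =>
    rw [PySem.List.enumerate_cons]
    obtain ⟨a, b⟩ := p
    simp only [pvFirstNe]
    cases j with
    | zero => rw [if_pos (by simpa using ht)]; simp
    | succ j =>
      rw [if_neg (by simpa using hb 0 (by omega))]
      rw [ih (s + 1) j (by simpa using hj) (fun i hi => by simpa using hb (i + 1) (by omega))
        (by simpa using ht)]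
      push_cast; ring

-- min over a foldl of lengths
lemma pv_foldl_min_le (rest : List (List String)) (a : Nat) :
    (rest.foldl (fun m x => min m x.length) a) ≤ a ∧
      ∀ x ∈ rest, (rest.foldl (fun m x => min m x.length) a) ≤ x.length := by
  induction rest generalizing a with
  | nil => simp
  | cons y t ih =>
    simp only [List.foldl_cons]
    obtain ⟨h1, h2⟩ := ih (min a y.length)
    refine ⟨h1.trans (by omega), ?_⟩
    intro x hx
    rcases List.mem_cons.mp hx with rfl | hxt
    · exact h1.trans (by omega)
    · exact h2 x hxt

lemma pv_le_foldl_min (rest : List (List String)) (a k : Nat)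
    (ha : k ≤ a) (h : ∀ x ∈ rest, k ≤ x.length) :
    k ≤ rest.foldl (fun m x => min m x.length) a := by
  induction rest generalizing a with
  | nil => simpa
  | cons y t ih =>
    simp only [List.foldl_cons]
    exact ih (min a y.length) (by have := h y (by simp); omega) (fun x hx => h x (by simp [hx]))

-- the two diff levels agree on a nonempty list
lemma pv_diff_eq (cs : List (List String)) (hne : cs ≠ []) (lo hi : List String)
    (hlo : pvLexMin cs = some lo) (hhi : pvLexMax cs = some hi) :
    pvFindDiff (PySem.List.enumerate (pvZipStar cs))
      = pvFirstNe (PySem.List.enumerate (lo.zip hi)) := by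
  obtain ⟨l, rest, rfl⟩ : ∃ l rest, cs = l :: rest := by
    cases cs with
    | nil => exact absurd rfl hne
    | cons l rest => exact ⟨l, rest, rfl⟩
  have hlomem : lo ∈ l :: rest := @PySem.List.min?_mem (List String) (List String) Preorder.toLT LinearOrder.toDecidableLT _ _ _ hlo
  have hlomin : ∀ y ∈ l :: rest, lo ≤ y := PySem.List.min?_isMin hlo
  have hhimem : hi ∈ l :: rest := @PySem.List.max?_mem (List String) (List String) Preorder.toLT LinearOrder.toDecidableLT _ _ _ hhi
  have hhimax : ∀ y ∈ l :: rest, y ≤ hi := PySem.List.max?_isMax hhi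
  set m := rest.foldl (fun m x => min m x.length) l.length with hm
  have hmle : ∀ x ∈ l :: rest, m ≤ x.length := by
    intro x hx
    rcases List.mem_cons.mp hx with rfl | hxt
    · exact (pv_foldl_min_le rest x.length).1
    · exact (pv_foldl_min_le rest l.length).2 x hxt
  set n := min lo.length hi.length with hn
  have hzlen : (lo.zip hi).length = n := List.length_zip
  have hcols : pvZipStar (l :: rest)
      = (List.range m).map (fun i => (l :: rest).map (fun x => x.getD i "")) := rfl
  have htake_eq : ∀ (u v : List String) (k : Nat), k ≤ u.length → k ≤ v.length →
      (∀ i, i < k → u.getD i "" = v.getD i "") → u.take k = v.take k := by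
    intro u v k hu hv hiq
    apply List.ext_getElem (by simp [List.length_take]; omega)
    intro i h1 h2
    rw [List.getElem_take, List.getElem_take]
    have hik : i < k := by simp [List.length_take] at h1; omega
    have := hiq i hik
    rwa [List.getD_eq_getElem u "" (by omega), List.getD_eq_getElem v "" (by omega)] at this
  have hgetD_of_take : ∀ (u v : List String) (k i : Nat), i < k →
      u.take k = v.take k → u.getD i "" = v.getD i "" := by
    intro u v k i hik htk
    have h1 : (u.take k)[i]? = (v.take k)[i]? := by rw [htk]
    rw [List.getElem?_take_of_lt hik, List.getElem?_take_of_lt hik] at h1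
    rw [List.getD_eq_getElem?_getD, List.getD_eq_getElem?_getD, h1]
  by_cases hex : ∃ i, i < n ∧ lo.getD i "" ≠ hi.getD i ""
  · -- lo and hi first differ at index j = Nat.find hex; both scans stop there
    obtain ⟨hjn, hjne⟩ := Nat.find_spec hex
    set j := Nat.find hex with hj
    have hagree : ∀ i, i < j → lo.getD i "" = hi.getD i "" := by
      intro i hij
      by_contra hne'
      exact Nat.find_min hex hij ⟨lt_trans hij hjn, hne'⟩
    have hjlo : j < lo.length := lt_of_lt_of_le hjn (min_le_left _ _)
    have hjhi : j < hi.length := lt_of_lt_of_le hjn (min_le_right _ _)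
    have hB : pvFirstNe (PySem.List.enumerate (lo.zip hi)) = 0 + (j : Int) := by
      apply pv_firstNe_first _ 0 j (by omega)
      · intro i hij
        have hin : i < n := lt_trans hij hjn
        rw [List.getElem_zip]
        have := hagree i hij
        rwa [List.getD_eq_getElem lo "" (by omega), List.getD_eq_getElem hi "" (by omega)] at this
      · rw [List.getElem_zip]
        have := hjne
        rwa [List.getD_eq_getElem lo "" hjlo, List.getD_eq_getElem hi "" hjhi] at this
    have htake : lo.take j = hi.take j := htake_eq lo hi j hjlo.le hjhi.le hagree
    have hsand : ∀ x ∈ l :: rest, x.take j = lo.take j ∧ j ≤ x.length :=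
      fun x hx => pv_sandwich j lo x hi (hlomin x hx) (hhimax x hx) hjlo.le htake
    have hlen1 : ∀ x ∈ l :: rest, j + 1 ≤ x.length := by
      intro x hx
      obtain ⟨htx, hlx⟩ := hsand x hx
      rcases Nat.lt_or_ge j x.length with hlt | hge
      · omega
      · exfalso
        have hxeq : x = lo.take j := by rw [← htx]; exact (List.take_of_length_le hge).symm
        have hlt' : lo.take j < lo := pv_take_lt lo j hjlo
        rw [← hxeq] at hlt'
        exact absurd (lt_of_le_of_lt (hlomin x hx) hlt') (lt_irrefl _)
    have hjm : j + 1 ≤ m :=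
      pv_le_foldl_min rest l.length (j + 1) (hlen1 l (by simp)) (fun x hx => hlen1 x (by simp [hx]))
    have hA : pvFindDiff (PySem.List.enumerate (pvZipStar (l :: rest))) = 0 + (j : Int) := by
      rw [hcols]
      apply pv_findDiff_first _ 0 j (by simp; omega)
      · intro i hij
        have hibound : i < ((List.range m).map
            (fun i => (l :: rest).map (fun x => x.getD i ""))).length := by simp; omega
        rw [pv_setlen_le_one_iff]
        intro a ha b hb
        rw [List.getElem_map, List.getElem_range] at ha hb
        obtain ⟨xa, hxa, rfl⟩ := List.mem_map.mp ha
        obtain ⟨xb, hxb, rfl⟩ := List.mem_map.mp hb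
        have h1 := hgetD_of_take xa lo j i hij (hsand xa hxa).1
        have h2 := hgetD_of_take xb lo j i hij (hsand xb hxb).1
        rw [h1, h2]
      · rw [List.getElem_map, List.getElem_range]
        by_contra h0
        rw [pv_setlen_le_one_iff] at h0
        exact hjne (h0 (lo.getD j "") (List.mem_map.mpr ⟨lo, hlomem, rfl⟩)
          (hi.getD j "") (List.mem_map.mpr ⟨hi, hhimem, rfl⟩))
    rw [hA, hB]
  · -- lo = hi up to the zip length: every column within range is constant, both scans return 0
    simp only [not_exists, not_and, not_not, ne_eq] at hex
    have hag : ∀ i, i < n → lo.getD i "" = hi.getD i "" := hex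
    have hB : pvFirstNe (PySem.List.enumerate (lo.zip hi)) = 0 := by
      apply pv_firstNe_zero
      intro p hp
      obtain ⟨i, hilen, rfl⟩ := List.mem_iff_getElem.mp hp
      rw [List.getElem_zip]
      have hin : i < n := by omega
      have := hag i hin
      rwa [List.getD_eq_getElem lo "" (by omega), List.getD_eq_getElem hi "" (by omega)] at this
    have hlohi : lo ≤ hi := hhimax lo hlomem
    have hlolen : lo.length = n := by
      rcases Nat.le_total lo.length hi.length with hle | hle
      · omega
      · by_contra hne'
        have hnhi : n = hi.length := by omega
        have hnlt : n < lo.length := by omega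
        have htk : lo.take n = hi.take n :=
          htake_eq lo hi n hnlt.le (by omega) hag
        have htk2 : hi.take n = hi := List.take_of_length_le (by omega)
        have hlt' : lo.take n < lo := pv_take_lt lo n hnlt
        rw [htk, htk2] at hlt'
        exact absurd (lt_of_le_of_lt hlohi hlt') (lt_irrefl _)
    have htaken : lo.take n = hi.take n := htake_eq lo hi n (by omega) (by omega) hag
    have hsand : ∀ x ∈ l :: rest, x.take n = lo.take n ∧ n ≤ x.length :=
      fun x hx => pv_sandwich n lo x hi (hlomin x hx) (hhimax x hx) (by omega) htaken
    have hmn : m ≤ n := le_trans (hmle lo hlomem) (by omega)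
    have hA : pvFindDiff (PySem.List.enumerate (pvZipStar (l :: rest))) = 0 := by
      rw [hcols]
      apply pv_findDiff_zero
      intro col hcol
      obtain ⟨i, hir, rfl⟩ := List.mem_map.mp hcol
      have him : i < m := List.mem_range.mp hir
      rw [pv_setlen_le_one_iff]
      intro a ha b hb
      obtain ⟨xa, hxa, rfl⟩ := List.mem_map.mp ha
      obtain ⟨xb, hxb, rfl⟩ := List.mem_map.mp hb
      have h1 := hgetD_of_take xa lo n i (by omega) (hsand xa hxa).1
      have h2 := hgetD_of_take xb lo n i (by omega) (hsand xb hxb).1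
      rw [h1, h2]
    rw [hA, hB]

-- ===== VERDICT (by name: the statement is the Claim_ definition above) =====
theorem extract_modules_name_spec : Claim_equal_extract_modules_name := by
  intro parameter_names _
  unfold Spec_extract_modules_name
  cases hpn : parameter_names with
  | nil => rfl
  | cons p ps =>
    have hne : (p :: ps).map pvNorm ≠ [] := by simp
    obtain ⟨lo, hlo⟩ : ∃ lo, pvLexMin ((p :: ps).map pvNorm) = some lo := by
      cases h : pvLexMin ((p :: ps).map pvNorm) with
      | none => exact absurd ((@PySem.List.min?_eq_none_iff (List String) (List String) Preorder.toLT LinearOrder.toDecidableLT _ _).mp h) hne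
      | some lo => exact ⟨lo, rfl⟩
    obtain ⟨hi, hhi⟩ : ∃ hi, pvLexMax ((p :: ps).map pvNorm) = some hi := by
      cases h : pvLexMax ((p :: ps).map pvNorm) with
      | none => exact absurd ((@PySem.List.max?_eq_none_iff (List String) (List String) Preorder.toLT LinearOrder.toDecidableLT _ _).mp h) hne
      | some hi => exact ⟨hi, rfl⟩
    unfold extract_modules_name extract_modules_name_alt
    rw [if_neg (by simp)]
    simp only [hlo, hhi, Option.getD_some]
    rw [pv_diff_eq ((p :: ps).map pvNorm) hne lo hi hlo hhi]
    rw [pv_foldl_dedup (p :: ps) (pvModuleName _) []]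
    rw [PySem.Set.update_nil_left]
    simp [PySem.List.dedup]
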